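-- pv_equiv track=rewrite | github.com/Cloud84-blip/SudokuApp | generator_heuristic.py | find_least_constrained_cell
-- ===== SOURCE A (Python) =====
-- def is_safe(grid, row, col, num):
--     size = len(grid)
--     block_size = int(size ** 0.5)
--
--     # Check row and column
--     for x in range(size):
--         if grid[row][x] == num or grid[x][col] == num:
--             return False
--
--     # Check the square
--     start_row = row - row % block_size
--     start_col = col - col % block_size
--     for i in range(block_size):
--         for j in range(block_size):
--             if grid[i + start_row][j + start_col] == num:
--                 return False
--
--     return True
--
-- def find_least_constrained_cell(grid):
--     size = len(grid)
--     min_options = size + 1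
--     cell = None
--     for r in range(size):
--         for c in range(size):
--             if grid[r][c] == 0:
--                 options = sum(is_safe(grid, r, c, num) for num in range(1, size + 1))
--                 if options < min_options:
--                     min_options = options
--                     cell = (r, c)
--     return cell
-- ===== SOURCE B (Python) =====
-- def find_least_constrained_cell(grid):
--     size = len(grid)
--     if size == 0:
--         return None
--     bs = int(size ** 0.5)
--     nb = size // bs
--     # precompute the values already used in each row, column and block once,
--     # so counting a cell's candidates is a membership test instead of a rescan
--     row_set = [set(row[:size]) for row in grid]
--     col_set = [{grid[r][c] for r in range(size)} for c in range(size)]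
--     blk_set = [[{grid[br * bs + i][bc * bs + j] for i in range(bs) for j in range(bs)}
--                 for bc in range(nb)] for br in range(nb)]
--     best = None
--     best_n = size + 1
--     for r in range(size):
--         for c in range(size):
--             if grid[r][c] == 0:
--                 rs, cs, bset = row_set[r], col_set[c], blk_set[r // bs][c // bs]
--                 n = 0
--                 for num in range(1, size + 1):
--                     if num not in rs and num not in cs and num not in bset:
--                         n += 1
--                 if n < best_n:
--                     best_n = n
--                     best = (r, c)
--     return best
-- ===== Notes on version B (the rewrite author's own statement) =====
-- stated objective: faster
-- what changed: B precomputes the set of used values per row, column and block once, so each candidate test is a set membership instead of A's is_safe rescan of the whole row/column/block, dropping O(n^4) to O(n^3).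
import Mathlib
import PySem

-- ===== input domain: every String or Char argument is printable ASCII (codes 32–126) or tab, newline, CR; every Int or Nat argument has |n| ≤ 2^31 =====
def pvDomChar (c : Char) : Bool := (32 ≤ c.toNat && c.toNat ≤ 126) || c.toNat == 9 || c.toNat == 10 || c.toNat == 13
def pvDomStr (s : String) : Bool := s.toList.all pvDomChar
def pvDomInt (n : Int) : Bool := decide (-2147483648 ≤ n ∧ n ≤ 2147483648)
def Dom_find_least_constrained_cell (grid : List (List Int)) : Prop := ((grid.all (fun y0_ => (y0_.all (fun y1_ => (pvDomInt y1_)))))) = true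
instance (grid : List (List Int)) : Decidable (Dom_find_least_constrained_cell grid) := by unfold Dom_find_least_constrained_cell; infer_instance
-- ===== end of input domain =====

-- B precomputes the used values of every row / column / block once (Python sets), so a
-- candidate test is a membership check instead of A's is_safe rescan of row+column+block.
-- int(size ** 0.5) is ported as pvISqrt, a structural floor square root (exact for every
-- list length a machine can hold).

-- int(size ** 0.5): floor square root, kernel-transparent structural recursion
def pvISqrtAux (n : Nat) : Nat → Nat
  | 0 => 0
  | (k + 1) => if (k + 1) * (k + 1) ≤ n then k + 1 else pvISqrtAux n k
def pvISqrt (n : Nat) : Nat := pvISqrtAux n n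

-- shared total index accessor: grid[r][c]; in-range on every access under Pre_
def pvCell (grid : List (List Int)) (r c : Nat) : Int := (grid.getD r []).getD c 0

-- ===== PORT A =====
def pvIsSafe (grid : List (List Int)) (row col num : Nat) : Bool :=
  let size := grid.length
  let bs := pvISqrt size
  -- "for x in range(size): if … return False" = any-scan
  if (List.range size).any (fun x =>
        pvCell grid row x == (num : Int) || pvCell grid x col == (num : Int)) then
    false
  else
    let sr := row - row % bs
    let sc := col - col % bs
    !((List.range bs).any (fun i => (List.range bs).any (fun j =>
        pvCell grid (i + sr) (j + sc) == (num : Int))))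

-- options = sum(is_safe(...) for num in range(1, size+1))
def pvOptionsA (grid : List (List Int)) (r c : Nat) : Int :=
  ((((List.range grid.length).map (fun k => k + 1))).filter
      (fun num => pvIsSafe grid r c num)).length

def find_least_constrained_cell (grid : List (List Int)) : Option (Int × Int) :=
  let size := grid.length
  let res := (List.range size).foldl (fun st r =>
    (List.range size).foldl (fun st c =>
      if pvCell grid r c == 0 then
        let options := pvOptionsA grid r c
        if options < st.1 then (options, some ((r : Int), (c : Int))) else st
      else st) st) (((size : Int) + 1, none) : Int × Option (Int × Int))
  res.2

-- ===== PORT B =====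
def pvRowSets (grid : List (List Int)) : List (PySem.Set Int) :=
  grid.map (fun row => PySem.Set.ofList (row.take grid.length))

def pvColSets (grid : List (List Int)) : List (PySem.Set Int) :=
  (List.range grid.length).map (fun c =>
    PySem.Set.ofList ((List.range grid.length).map (fun r => pvCell grid r c)))

def pvBlkSets (grid : List (List Int)) (bs nb : Nat) : List (List (PySem.Set Int)) :=
  (List.range nb).map (fun br => (List.range nb).map (fun bc =>
    PySem.Set.ofList ((List.range bs).flatMap (fun i =>
      (List.range bs).map (fun j => pvCell grid (br * bs + i) (bc * bs + j))))))

-- "n = 0; for num in range(1, size+1): if num not in rs and … : n += 1"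
def pvCountB (size : Nat) (rs cs bset : PySem.Set Int) : Int :=
  (List.range size).foldl (fun (n : Int) (k : Nat) =>
    if !(PySem.Set.contains rs ((k : Int) + 1)) && !(PySem.Set.contains cs ((k : Int) + 1))
        && !(PySem.Set.contains bset ((k : Int) + 1)) then n + 1 else n) 0

def find_least_constrained_cell_alt (grid : List (List Int)) : Option (Int × Int) :=
  let size := grid.length
  if size == 0 then none
  else
    let bs := pvISqrt size
    let nb := size / bs
    let rows := pvRowSets grid
    let cols := pvColSets grid
    let blks := pvBlkSets grid bs nb
    let res := (List.range size).foldl (fun st r =>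
      (List.range size).foldl (fun st c =>
        if pvCell grid r c == 0 then
          let n := pvCountB size (rows.getD r []) (cols.getD c [])
                     ((blks.getD (r / bs) []).getD (c / bs) [])
          if n < st.1 then (n, some ((r : Int), (c : Int))) else st
        else st) st) (((size : Int) + 1, none) : Int × Option (Int × Int))
    res.2

-- ===== PRECONDITION & SPEC =====
-- Pre_ excludes (a) grids with a row shorter than the grid, on which A raises IndexError, and
-- (b) grids whose size is not divisible by int(size**0.5): there A's block scan runs off the
-- grid (IndexError) whenever an empty cell lies in the last partial block band, and only returns
-- (e.g. None, or a cell judged without a full block) when the empty cells happen to avoid it,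
-- while B's block table does not cover such sizes (it raises IndexError on those empty cells).
def Pre_find_least_constrained_cell (grid : List (List Int)) : Prop :=
  (∀ row ∈ grid, grid.length ≤ row.length) ∧ pvISqrt grid.length ∣ grid.length
instance (grid : List (List Int)) : Decidable (Pre_find_least_constrained_cell grid) := by
  unfold Pre_find_least_constrained_cell; infer_instance

def pvWitness_find_least_constrained_cell : List (List Int) :=
  [[1, 0, 3, 4], [3, 4, 0, 2], [0, 3, 4, 1], [4, 0, 2, 3]]

def Spec_find_least_constrained_cell (grid : List (List Int)) (out : Option (Int × Int)) : Prop :=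
  out = find_least_constrained_cell_alt grid
instance (grid : List (List Int)) (out : Option (Int × Int)) :
    Decidable (Spec_find_least_constrained_cell grid out) := by
  unfold Spec_find_least_constrained_cell; infer_instance

-- ===== CLAIM (what is proved, stated in full; the proofs are below) =====
def Claim_equal_find_least_constrained_cell : Prop :=
  ∀ (grid : List (List Int)), Dom_find_least_constrained_cell grid →
    Pre_find_least_constrained_cell grid →
    Spec_find_least_constrained_cell grid (find_least_constrained_cell grid)

-- ===== LEMMAS AND PROOFS =====

theorem pvISqrtAux_pos (n : Nat) (hn : 0 < n) : ∀ k, 0 < k → 0 < pvISqrtAux n k := by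
  intro k
  induction k with
  | zero => intro h; omega
  | succ k ih =>
    intro _
    unfold pvISqrtAux
    split_ifs with h
    · omega
    · have hk : 0 < k := by
        by_contra hk0
        have hk1 : k = 0 := by omega
        subst hk1
        omega
      exact ih hk

theorem pvISqrt_pos (n : Nat) (hn : 0 < n) : 0 < pvISqrt n :=
  pvISqrtAux_pos n hn n hn


-- row set lookup: rows[r] = set(grid[r][:size])
theorem pv_mem_rowSet (grid : List (List Int)) (r : Nat) (hr : r < grid.length)
    (hrow : grid.length <= (grid.getD r []).length) (num : Int) :
    num ∈ (pvRowSets grid).getD r [] ↔ ∃ x, x < grid.length ∧ pvCell grid r x = num := by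
  have hgr : grid.getD r [] = grid[r] := List.getD_eq_getElem grid [] hr
  have e1 : (pvRowSets grid).getD r [] = PySem.Set.ofList (grid[r].take grid.length) := by
    unfold pvRowSets
    rw [List.getD_eq_getElem _ _ (by simpa using hr)]
    simp
  rw [hgr] at hrow
  rw [e1, PySem.Set.mem_ofList]
  unfold pvCell
  constructor
  · intro h
    obtain ⟨i, hi, hEq⟩ := List.mem_iff_getElem.mp h
    have hi' : i < grid.length := by simp [List.length_take] at hi; omega
    refine ⟨i, hi', ?_⟩
    rw [hgr, List.getD_eq_getElem _ 0 (by omega)]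
    rw [List.getElem_take] at hEq
    exact hEq
  · rintro ⟨x, hx, hEq⟩
    rw [hgr, List.getD_eq_getElem _ 0 (by omega)] at hEq
    apply List.mem_iff_getElem.mpr
    refine ⟨x, by simp [List.length_take]; omega, ?_⟩
    rw [List.getElem_take]
    exact hEq

theorem pv_mem_colSet (grid : List (List Int)) (c : Nat) (hc : c < grid.length) (num : Int) :
    num ∈ (pvColSets grid).getD c [] ↔ ∃ x, x < grid.length ∧ pvCell grid x c = num := by
  have e1 : (pvColSets grid).getD c [] =
      PySem.Set.ofList ((List.range grid.length).map (fun r => pvCell grid r c)) := by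
    unfold pvColSets
    rw [List.getD_eq_getElem _ _ (by simpa using hc)]
    simp
  rw [e1, PySem.Set.mem_ofList]
  simp only [List.mem_map, List.mem_range]

theorem pv_mem_blkSet (grid : List (List Int)) (bs nb br bc : Nat)
    (hbr : br < nb) (hbc : bc < nb) (num : Int) :
    num ∈ ((pvBlkSets grid bs nb).getD br []).getD bc [] ↔
      ∃ i, i < bs ∧ ∃ j, j < bs ∧ pvCell grid (br * bs + i) (bc * bs + j) = num := by
  have e1 : ((pvBlkSets grid bs nb).getD br []).getD bc [] =
      PySem.Set.ofList ((List.range bs).flatMap (fun i =>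
        (List.range bs).map (fun j => pvCell grid (br * bs + i) (bc * bs + j)))) := by
    simp [pvBlkSets, List.getD_eq_getElem?_getD, hbr, hbc]
  rw [e1, PySem.Set.mem_ofList]
  simp only [List.mem_flatMap, List.mem_map, List.mem_range]

-- the two early-return scans of is_safe, as propositions
theorem pv_isSafe_eq (grid : List (List Int)) (r c num : Nat) :
    pvIsSafe grid r c num = true ↔
      (¬ ∃ x, x < grid.length ∧
          (pvCell grid r x = (num : Int) ∨ pvCell grid x c = (num : Int))) ∧
      (¬ ∃ i, i < pvISqrt grid.length ∧ ∃ j, j < pvISqrt grid.length ∧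
          pvCell grid (i + (r - r % pvISqrt grid.length))
            (j + (c - c % pvISqrt grid.length)) = (num : Int)) := by
  simp only [pvIsSafe]
  split_ifs with h
  · simp only [false_iff, not_and, not_not]
    intro h1
    simp only [List.any_eq_true, List.mem_range, Bool.or_eq_true, beq_iff_eq] at h
    exact absurd h h1
  · simp only [List.any_eq_true, List.mem_range, Bool.or_eq_true, beq_iff_eq] at h
    rw [Bool.not_eq_true', List.any_eq_false]
    constructor
    · intro hblk
      refine ⟨h, ?_⟩
      rintro ⟨i, hi, j, hj, hEq⟩
      have h2 := hblk i (List.mem_range.mpr hi)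
      rw [Bool.not_eq_true, List.any_eq_false] at h2
      have h3 := h2 j (List.mem_range.mpr hj)
      exact h3 (beq_iff_eq.mpr hEq)
    · rintro ⟨_, hblk⟩ i hi
      rw [Bool.not_eq_true, List.any_eq_false]
      intro j hj hbeq
      exact hblk ⟨i, List.mem_range.mp hi, j, List.mem_range.mp hj, beq_iff_eq.mp hbeq⟩

-- the per-number agreement: is_safe = "not used in row, column or block"
theorem pv_isSafe_iff (grid : List (List Int)) (r c num : Nat)
    (pre : Pre_find_least_constrained_cell grid)
    (hr : r < grid.length) (hc : c < grid.length) :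
    pvIsSafe grid r c num = true ↔
      ((num : Int) ∉ (pvRowSets grid).getD r [] ∧
       (num : Int) ∉ (pvColSets grid).getD c [] ∧
       (num : Int) ∉ ((pvBlkSets grid (pvISqrt grid.length)
          (grid.length / pvISqrt grid.length)).getD (r / pvISqrt grid.length) []).getD
          (c / pvISqrt grid.length) []) := by
  obtain ⟨hrows, hdvd⟩ := pre
  have hbs : 0 < pvISqrt grid.length := pvISqrt_pos grid.length (by omega)
  have hrow : grid.length <= (grid.getD r []).length := by
    apply hrows
    rw [List.getD_eq_getElem grid [] hr]
    exact List.getElem_mem hr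
  rw [pv_mem_rowSet grid r hr hrow ((num : Int)), pv_mem_colSet grid c hc ((num : Int)),
      pv_mem_blkSet grid (pvISqrt grid.length) (grid.length / pvISqrt grid.length)
        (r / pvISqrt grid.length) (c / pvISqrt grid.length)
        (Nat.div_lt_div_of_lt_of_dvd hdvd hr) (Nat.div_lt_div_of_lt_of_dvd hdvd hc)
        ((num : Int)),
      pv_isSafe_eq grid r c num]
  have hsr : r - r % pvISqrt grid.length = r / pvISqrt grid.length * pvISqrt grid.length := by
    have h1 := Nat.div_add_mod r (pvISqrt grid.length)
    have h2 : pvISqrt grid.length * (r / pvISqrt grid.length)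
        = r / pvISqrt grid.length * pvISqrt grid.length := Nat.mul_comm _ _
    omega
  have hsc : c - c % pvISqrt grid.length = c / pvISqrt grid.length * pvISqrt grid.length := by
    have h1 := Nat.div_add_mod c (pvISqrt grid.length)
    have h2 : pvISqrt grid.length * (c / pvISqrt grid.length)
        = c / pvISqrt grid.length * pvISqrt grid.length := Nat.mul_comm _ _
    omega
  constructor
  · rintro ⟨h1, h2⟩
    refine ⟨?_, ?_, ?_⟩
    · rintro ⟨x, hx, hEq⟩; exact h1 ⟨x, hx, Or.inl hEq⟩
    · rintro ⟨x, hx, hEq⟩; exact h1 ⟨x, hx, Or.inr hEq⟩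
    · rintro ⟨i, hi, j, hj, hEq⟩
      refine h2 ⟨i, hi, j, hj, ?_⟩
      have ei : i + (r - r % pvISqrt grid.length)
          = r / pvISqrt grid.length * pvISqrt grid.length + i := by omega
      have ej : j + (c - c % pvISqrt grid.length)
          = c / pvISqrt grid.length * pvISqrt grid.length + j := by omega
      rw [ei, ej]
      exact hEq
  · rintro ⟨h1, h2, h3⟩
    constructor
    · rintro ⟨x, hx, hor⟩
      rcases hor with hEq | hEq
      · exact h1 ⟨x, hx, hEq⟩
      · exact h2 ⟨x, hx, hEq⟩
    · rintro ⟨i, hi, j, hj, hEq⟩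
      refine h3 ⟨i, hi, j, hj, ?_⟩
      have ei : i + (r - r % pvISqrt grid.length)
          = r / pvISqrt grid.length * pvISqrt grid.length + i := by omega
      have ej : j + (c - c % pvISqrt grid.length)
          = c / pvISqrt grid.length * pvISqrt grid.length + j := by omega
      rw [ei, ej] at hEq
      exact hEq

-- the per-cell agreement: A's option sum = B's membership count
theorem pv_options_eq (grid : List (List Int)) (r c : Nat)
    (pre : Pre_find_least_constrained_cell grid)
    (hr : r < grid.length) (hc : c < grid.length) :
    pvOptionsA grid r c =
      pvCountB grid.length ((pvRowSets grid).getD r []) ((pvColSets grid).getD c [])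
        (((pvBlkSets grid (pvISqrt grid.length)
            (grid.length / pvISqrt grid.length)).getD (r / pvISqrt grid.length) []).getD
            (c / pvISqrt grid.length) []) := by
  unfold pvOptionsA pvCountB
  rw [PySem.List.foldl_count_if]
  rw [← List.countP_eq_length_filter, List.countP_map]
  simp only [Int.zero_add, Nat.cast_inj]
  apply List.countP_congr
  intro k hk
  rw [Function.comp_apply]
  rw [pv_isSafe_iff grid r c (k + 1) pre hr hc]
  simp only [Bool.and_eq_true, Bool.not_eq_true', Nat.cast_add, Nat.cast_one]
  have hmem : ∀ (s : PySem.Set Int) (v : Int),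
      PySem.Set.contains s v = false ↔ v ∉ s := by
    intro s v
    rw [← Bool.not_eq_true, PySem.Set.contains_iff]
  rw [hmem, hmem, hmem]
  constructor
  · rintro ⟨h1, h2, h3⟩; exact ⟨⟨h1, h2⟩, h3⟩
  · rintro ⟨⟨h1, h2⟩, h3⟩; exact ⟨h1, h2, h3⟩

-- ===== VERDICT (by name: the statement is the Claim_ definition above) =====
theorem find_least_constrained_cell_spec : Claim_equal_find_least_constrained_cell := by
  intro grid _ pre
  unfold Spec_find_least_constrained_cell
  by_cases h0 : grid.length = 0
  · have : grid = [] := List.length_eq_zero_iff.mp h0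
    subst this
    rfl
  · unfold find_least_constrained_cell find_least_constrained_cell_alt
    simp only [beq_iff_eq, h0, if_false]
    congr 1
    apply PySem.List.foldl_congr_mem'
    intro r hr st
    apply PySem.List.foldl_congr_mem'
    intro c hc st'
    rw [pv_options_eq grid r c pre (List.mem_range.mp hr) (List.mem_range.mp hc)]
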